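-- pv_equiv track=rewrite | github.com/stepin104483/Log-Analysis-tool | DeviceSWAnalyzer/src/modules/combos/knowledge/knowledge_base.py | _normalize_combo_key
-- ===== SOURCE A (Python) =====
-- def _normalize_combo_key(combo_str: str) -> str:
--     """Normalize a combo key string."""
--     # Remove common prefixes and normalize format
--     combo_str = combo_str.strip().upper()
--     combo_str = combo_str.replace('B', '').replace('_', '-').replace('+', '-')
--
--     # Sort components for consistent key
--     parts = combo_str.split('-')
--     lte_parts = []
--     nr_parts = []
--
--     for part in parts:
--         part = part.strip()
--         if part.startswith('N') and part[1:2].isdigit():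
--             nr_parts.append(part.lower())  # n77A format
--         else:
--             lte_parts.append(part)  # 66A format
--
--     # Sort each group
--     lte_parts.sort(key=lambda x: (int(''.join(c for c in x if c.isdigit()) or '0'), x))
--     nr_parts.sort(key=lambda x: (int(''.join(c for c in x if c.isdigit()) or '0'), x))
--
--     return '-'.join(lte_parts + nr_parts)
-- ===== SOURCE B (Python) =====
-- def _normalize_combo_key(combo_str: str) -> str:
--     """Normalize a combo key string."""
--     # Single character pass for the normalization (upper, drop B, unify separators).
--     out = []
--     for c in combo_str.strip():
--         u = c.upper()
--         if u == 'B':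
--             continue
--         out.append('-' if u in '_+' else u)
--     s = ''.join(out)
--
--     # Bucket sort: group tokens by (group, numeric value) in a dict, then walk
--     # the sorted distinct keys and emit each (small) bucket sorted by token.
--     buckets = {}
--     for part in s.split('-'):
--         p = part.strip()
--         if p.startswith('N') and p[1:2].isdigit():
--             p = p.lower()
--             g = 1
--         else:
--             g = 0
--         num = int(''.join(ch for ch in p if ch.isdigit()) or '0')
--         buckets.setdefault((g, num), []).append(p)
--
--     return '-'.join(t for k in sorted(buckets) for t in sorted(buckets[k]))
-- ===== Notes on version B (the rewrite author's own statement) =====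
-- stated objective: alternative
-- what changed: B normalizes in one character pass (upper-case, drop B, map _/+ to -) instead of A's chain of str.replace calls, and replaces A's partition-into-two-lists with two full stable key-tuple sorts by a dict of buckets keyed on (group, numeric value): it sorts only the distinct keys and each small per-key bucket of tokens.
import Mathlib
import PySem

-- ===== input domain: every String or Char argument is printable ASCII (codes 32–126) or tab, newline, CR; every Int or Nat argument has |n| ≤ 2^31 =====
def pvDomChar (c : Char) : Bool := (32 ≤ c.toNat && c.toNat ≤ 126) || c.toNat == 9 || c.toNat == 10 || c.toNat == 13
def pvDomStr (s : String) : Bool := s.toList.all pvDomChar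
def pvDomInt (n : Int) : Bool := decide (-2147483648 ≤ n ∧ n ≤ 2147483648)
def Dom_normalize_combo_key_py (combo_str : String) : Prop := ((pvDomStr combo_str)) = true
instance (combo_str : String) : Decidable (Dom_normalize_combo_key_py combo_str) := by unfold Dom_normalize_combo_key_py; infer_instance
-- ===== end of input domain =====

-- B replaces A's partition-into-two-lists-and-two-token-sorts by a dict of buckets
-- keyed on (group, numeric value) — sorted distinct keys, per-bucket string sorts —
-- and a single character pass instead of A's chain of str.replace calls
-- (objective: alternative decomposition, same observable result).

-- shared helpers: subexpressions that appear verbatim in BOTH Python sources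
-- int(''.join(c for c in x if c.isdigit()) or '0')  — the 'match … none => 0' arm is
-- unreachable (a nonempty all-digit string always parses); exact on the domain
def pvNum (x : String) : Int :=
  let ds := x.toList.filter PySem.Chars.isdigit
  match PySem.Int.ofStr? (if ds.isEmpty then "0" else String.ofList ds) with
  | some v => v
  | none => 0

-- part.startswith('N') and part[1:2].isdigit()
def pvIsNR (p : String) : Bool :=
  PySem.Str.startswith p "N" && PySem.Str.strIsdigit (PySem.Str.slice p (some 1) (some 2))

-- s.split('-'); sep ≠ "" so split? is never none and getD [] is unreachable
def pvSplitDash (s : String) : List String :=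
  (PySem.Str.split? s "-").getD []

-- ===== PORT A =====
def normalize_combo_key_py (combo_str : String) : String :=
  let s0 := PySem.Str.upper (PySem.Str.strip combo_str)
  let s1 := PySem.Str.replace (PySem.Str.replace (PySem.Str.replace s0 "B" "") "_" "-") "+" "-"
  let parts := pvSplitDash s1
  -- the for-loop building lte_parts and nr_parts
  let acc := parts.foldl (fun (acc : List String × List String) part =>
      let p := PySem.Str.strip part
      if pvIsNR p then (acc.1, acc.2 ++ [PySem.Str.lower p]) else (acc.1 ++ [p], acc.2))
    ([], [])
  -- the two stable in-place sorts with tuple key (int(...), x)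
  let lte := PySem.List.sorted2 acc.1 pvNum (fun x => x)
  let nr := PySem.List.sorted2 acc.2 pvNum (fun x => x)
  PySem.Str.join "-" (lte ++ nr)

-- ===== PORT B =====
-- the character pass: upper-case, drop 'B', turn '_'/'+' into '-'
def pvNormChar (c : Char) : List Char :=
  let u := PySem.Chars.upperChar c
  if u = 'B' then [] else if u = '_' ∨ u = '+' then ['-'] else [u]

-- _tag(part): ((group, numeric value), token)
def pvTag (part : String) : (Int × Int) × String :=
  let p := PySem.Str.strip part
  let q := if pvIsNR p then PySem.Str.lower p else p
  let g : Int := if pvIsNR p then 1 else 0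
  ((g, pvNum q), q)

def normalize_combo_key_py_alt (combo_str : String) : String :=
  let s := String.ofList ((PySem.Chars.strip combo_str.toList).flatMap pvNormChar)
  -- buckets.setdefault(key, []).append(tok)
  let buckets := (pvSplitDash s).foldl
      (fun d part => let t := pvTag part; d.modify t.1 ([] : List String) (· ++ [t.2]))
      (PySem.Dict.empty : PySem.Dict (Int × Int) (List String))
  -- sorted(buckets) sorts the key tuples; buckets[k] is present for every k in keys
  let ks := PySem.List.sorted2 buckets.keys Prod.fst Prod.snd
  PySem.Str.join "-" (ks.flatMap (fun k => PySem.List.sorted (buckets.getD k []) (fun x => x) false))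

-- ===== PRECONDITION & SPEC =====
def Spec_normalize_combo_key_py (combo_str : String) (out : String) : Prop := out = normalize_combo_key_py_alt combo_str
instance (combo_str : String) (out : String) : Decidable (Spec_normalize_combo_key_py combo_str out) := by unfold Spec_normalize_combo_key_py; infer_instance

-- ===== CLAIM (what is proved, stated in full; the proofs are below) =====
def Claim_equal_normalize_combo_key_py : Prop := ∀ (combo_str : String), Dom_normalize_combo_key_py combo_str → Spec_normalize_combo_key_py combo_str (normalize_combo_key_py combo_str)

-- ===== LEMMAS AND PROOFS =====

-- ---------- the character pass equals A's replace chain ----------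

theorem pv_replace_single_go (o : Char) (new : List Char) :
    ∀ (fuel : Nat) (l acc : List Char), l.length ≤ fuel →
      PySem.Chars.replace.go [o] new fuel l acc
        = acc.reverse ++ l.flatMap (fun c => if c = o then new else [c]) := by
  intro fuel
  induction fuel with
  | zero =>
    intro l acc h
    have : l = [] := List.eq_nil_of_length_eq_zero (Nat.le_zero.mp h)
    subst this
    simp [PySem.Chars.replace.go]
  | succ fuel ih =>
    intro l acc h
    cases l with
    | nil => simp [PySem.Chars.replace.go]
    | cons c t =>
      simp only [List.length_cons] at h
      by_cases hc : o = c
      · subst hc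
        have hpre : List.isPrefixOf [o] (o :: t) = true := by simp [List.isPrefixOf]
        rw [PySem.Chars.replace.go]
        simp only [hpre, if_true]
        have hd : List.drop ([o].length) (o :: t) = t := by simp
        rw [hd, ih t (new.reverse ++ acc) (by omega)]
        simp
      · have hpre : List.isPrefixOf [o] (c :: t) = false := by
          simp [List.isPrefixOf]
          exact hc
        rw [PySem.Chars.replace.go]
        simp only [hpre, Bool.false_eq_true, if_false]
        rw [ih t (c :: acc) (by omega)]
        simp [if_neg (show ¬ c = o from fun h' => hc h'.symm)]

theorem pv_replace_single (l : List Char) (o : Char) (new : List Char) :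
    PySem.Chars.replace l [o] new = l.flatMap (fun c => if c = o then new else [c]) := by
  rw [PySem.Chars.replace]
  simp only [List.isEmpty_cons, Bool.false_eq_true]
  simpa using pv_replace_single_go o new l.length l [] (Nat.le_refl _)

theorem pv_norm_chain (cs : List Char) :
    PySem.Chars.replace (PySem.Chars.replace (PySem.Chars.replace
        (PySem.Chars.upper cs) ['B'] []) ['_'] ['-']) ['+'] ['-']
      = cs.flatMap pvNormChar := by
  simp only [PySem.Chars.upper, pv_replace_single]
  induction cs with
  | nil => rfl
  | cons c cs ih =>
    simp only [List.map_cons, List.flatMap_cons, List.flatMap_append, ih]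
    congr 1
    have hd : ¬ ('-' : Char) = '+' := by decide
    by_cases h1 : PySem.Chars.upperChar c = 'B'
    · simp [pvNormChar, h1]
    · by_cases h2 : PySem.Chars.upperChar c = '_'
      · simp [pvNormChar, h2, hd]
      · by_cases h3 : PySem.Chars.upperChar c = '+'
        · simp [pvNormChar, h3]
        · simp [pvNormChar, h1, h2, h3]

-- A's normalized string equals B's normalized string
theorem pv_norm_eq (combo_str : String) :
    PySem.Str.replace (PySem.Str.replace (PySem.Str.replace
        (PySem.Str.upper (PySem.Str.strip combo_str)) "B" "") "_" "-") "+" "-"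
      = String.ofList ((PySem.Chars.strip combo_str.toList).flatMap pvNormChar) := by
  apply String.toList_injective
  rw [String.toList_ofList]
  simp only [PySem.Str.toList_replace, PySem.Str.toList_upper, PySem.Str.toList_strip]
  have hB : ("B" : String).toList = ['B'] := by decide
  have hE : ("" : String).toList = [] := by decide
  have hU : ("_" : String).toList = ['_'] := by decide
  have hD : ("-" : String).toList = ['-'] := by decide
  have hP : ("+" : String).toList = ['+'] := by decide
  rw [hB, hE, hU, hD, hP]
  exact pv_norm_chain _

-- ---------- generic insertion-sort machinery ----------

def pvIS {α : Type} (before : α → α → Bool) (xs : List α) : List α :=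
  xs.foldl (fun acc x => PySem.List.insertBy before x acc) []

-- the exact comparators the two sorted2 calls decide with
def pvSLt (a b : String) : Bool :=
  decide (pvNum a < pvNum b) || (!decide (pvNum b < pvNum a) && decide (a < b))

def pvKLt (a b : Int × Int) : Bool :=
  decide (a.1 < b.1) || (!decide (b.1 < a.1) && decide (a.2 < b.2))

theorem pv_sorted2_A (xs : List String) :
    PySem.List.sorted2 xs pvNum (fun x => x) = pvIS pvSLt xs := rfl

theorem pv_sorted2_K (xs : List (Int × Int)) :
    PySem.List.sorted2 xs Prod.fst Prod.snd = pvIS pvKLt xs := rfl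

theorem pv_insertBy_perm {α : Type} (before : α → α → Bool) (x : α) (ys : List α) :
    (PySem.List.insertBy before x ys).Perm (x :: ys) := by
  induction ys with
  | nil => simp [PySem.List.insertBy]
  | cons y ys ih =>
    by_cases hb : before x y = true
    · simp [PySem.List.insertBy, hb]
    · simp only [Bool.not_eq_true] at hb
      simp only [PySem.List.insertBy, hb, Bool.false_eq_true, ite_false]
      exact (ih.cons y).trans (List.Perm.swap x y ys)

theorem pv_foldl_insertBy_perm {α : Type} (before : α → α → Bool) :
    ∀ (xs acc : List α),
      (xs.foldl (fun a x => PySem.List.insertBy before x a) acc).Perm (acc ++ xs) := by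
  intro xs
  induction xs with
  | nil => intro acc; simp
  | cons x xs ih =>
    intro acc
    simp only [List.foldl_cons]
    refine (ih _).trans ?_
    refine (List.Perm.append_right xs (pv_insertBy_perm before x acc)).trans ?_
    exact (List.perm_middle).symm

theorem pv_iS_perm {α : Type} (before : α → α → Bool) (xs : List α) :
    (pvIS before xs).Perm xs := by
  simpa using pv_foldl_insertBy_perm before xs []

theorem pv_insertBy_pairwise {α : Type} (before : α → α → Bool)
    (hasym : ∀ a b, before a b = true → before b a = false)
    (htr : ∀ a b c, before a b = true → before b c = true → before a c = true)
    (x : α) (ys : List α) (h : ys.Pairwise (fun a b => before b a = false)) :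
    (PySem.List.insertBy before x ys).Pairwise (fun a b => before b a = false) := by
  induction ys with
  | nil => simp [PySem.List.insertBy]
  | cons y ys ih =>
    rw [List.pairwise_cons] at h
    obtain ⟨h1, h2⟩ := h
    by_cases hb : before x y = true
    · simp only [PySem.List.insertBy, hb, if_pos]
      rw [List.pairwise_cons]
      constructor
      · intro z hz
        rcases hz with _ | hz
        · exact hasym _ _ hb
        · by_contra hzx
          rw [Bool.not_eq_false] at hzx
          have := htr _ _ _ hzx hb
          rw [h1 z (by assumption)] at this
          exact absurd this (by simp)
      · rw [List.pairwise_cons]; exact ⟨h1, h2⟩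
    · simp only [Bool.not_eq_true] at hb
      simp only [PySem.List.insertBy, hb, Bool.false_eq_true, ite_false]
      rw [List.pairwise_cons]
      constructor
      · intro z hz
        rcases (PySem.List.mem_insertBy _ _ _ _).1 hz with rfl | hz
        · exact hb
        · exact h1 z hz
      · exact ih h2

theorem pv_iS_pairwise {α : Type} (before : α → α → Bool)
    (hasym : ∀ a b, before a b = true → before b a = false)
    (htr : ∀ a b c, before a b = true → before b c = true → before a c = true)
    (xs : List α) : (pvIS before xs).Pairwise (fun a b => before b a = false) := by
  have H : ∀ (xs acc : List α), acc.Pairwise (fun a b => before b a = false) →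
      (xs.foldl (fun a x => PySem.List.insertBy before x a) acc).Pairwise
        (fun a b => before b a = false) := by
    intro xs
    induction xs with
    | nil => intro acc h; simpa
    | cons x xs ih =>
      intro acc h
      exact ih _ (pv_insertBy_pairwise before hasym htr x acc h)
  exact H xs [] (by simp)

-- ---------- comparator facts ----------

theorem pv_sLt_iff (a b : String) :
    pvSLt a b = true ↔ (pvNum a < pvNum b ∨ (¬ pvNum b < pvNum a ∧ a < b)) := by
  simp [pvSLt]

theorem pv_sLt_false_iff (a b : String) :
    pvSLt a b = false ↔ ¬ (pvNum a < pvNum b ∨ (¬ pvNum b < pvNum a ∧ a < b)) := by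
  rw [← pv_sLt_iff]
  simp

set_option maxHeartbeats 1000000 in
theorem pv_sLt_asym : ∀ a b, pvSLt a b = true → pvSLt b a = false := by
  intro a b h
  rw [pv_sLt_iff] at h
  rw [pv_sLt_false_iff]
  rintro (h' | ⟨h1', h2'⟩)
  · rcases h with h | ⟨h1, _⟩
    · omega
    · exact h1 h'
  · rcases h with h | ⟨_, h2⟩
    · exact h1' h
    · exact absurd h2' (lt_asymm h2)

set_option maxHeartbeats 1000000 in
theorem pv_sLt_trans : ∀ a b c, pvSLt a b = true → pvSLt b c = true → pvSLt a c = true := by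
  intro a b c hab hbc
  rw [pv_sLt_iff] at hab hbc ⊢
  rcases hab with h | ⟨h1, h2⟩ <;> rcases hbc with h' | ⟨h1', h2'⟩
  · exact Or.inl (by omega)
  · exact Or.inl (by omega)
  · exact Or.inl (by omega)
  · exact Or.inr ⟨by omega, lt_trans h2 h2'⟩

set_option maxHeartbeats 1000000 in
theorem pv_sLt_conn : ∀ a b, pvSLt a b = false → pvSLt b a = false → a = b := by
  intro a b h h'
  rw [pv_sLt_false_iff] at h h'
  rcases lt_trichotomy a b with hh | hh | hh
  · exact absurd (Or.inr ⟨fun hlt => h' (Or.inl hlt), hh⟩) h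
  · exact hh
  · exact absurd (Or.inr ⟨fun hlt => h (Or.inl hlt), hh⟩) h'

theorem pv_kLt_iff (a b : Int × Int) :
    pvKLt a b = true ↔ (a.1 < b.1 ∨ (¬ b.1 < a.1 ∧ a.2 < b.2)) := by
  simp [pvKLt]

theorem pv_kLt_false_iff (a b : Int × Int) :
    pvKLt a b = false ↔ ¬ (a.1 < b.1 ∨ (¬ b.1 < a.1 ∧ a.2 < b.2)) := by
  rw [← pv_kLt_iff]
  simp

set_option maxHeartbeats 1000000 in
theorem pv_kLt_asym : ∀ a b, pvKLt a b = true → pvKLt b a = false := by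
  intro a b h
  rw [pv_kLt_iff] at h
  rw [pv_kLt_false_iff]
  omega

set_option maxHeartbeats 1000000 in
theorem pv_kLt_trans : ∀ a b c, pvKLt a b = true → pvKLt b c = true → pvKLt a c = true := by
  intro a b c hab hbc
  rw [pv_kLt_iff] at hab hbc ⊢
  omega

set_option maxHeartbeats 1000000 in
theorem pv_kLt_conn : ∀ a b : Int × Int, pvKLt a b = false → pvKLt b a = false → a = b := by
  intro a b h h'
  rw [pv_kLt_false_iff] at h h'
  have : a.1 = b.1 ∧ a.2 = b.2 := by omega
  exact Prod.ext this.1 this.2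

-- ---------- grouping permutation ----------

theorem pv_flatMap_congr {α β : Type} (l : List α) (f g : α → List β)
    (h : ∀ a ∈ l, f a = g a) : l.flatMap f = l.flatMap g := by
  induction l with
  | nil => rfl
  | cons a l ih =>
    simp only [List.flatMap_cons, h a (by simp)]
    rw [ih (fun a ha => h a (by simp [ha]))]

theorem pv_flatMap_perm {α β : Type} (l : List α) (f g : α → List β)
    (h : ∀ a ∈ l, (f a).Perm (g a)) : (l.flatMap f).Perm (l.flatMap g) := by
  induction l with
  | nil => simp
  | cons a l ih =>
    simp only [List.flatMap_cons]
    exact (h a (by simp)).append (ih (fun a ha => h a (by simp [ha])))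

theorem pv_perm_groups {κ α : Type} [DecidableEq κ] (keyf : α → κ) :
    ∀ (ks : List κ) (L : List α), ks.Nodup → (∀ x ∈ L, keyf x ∈ ks) →
      (ks.flatMap (fun k => L.filter (fun x => keyf x = k))).Perm L := by
  intro ks
  induction ks with
  | nil =>
    intro L _ hcov
    have : L = [] := List.eq_nil_iff_forall_not_mem.mpr (fun x hx => by simpa using hcov x hx)
    simp [this]
  | cons k ks ih =>
    intro L hnd hcov
    rw [List.nodup_cons] at hnd
    simp only [List.flatMap_cons]
    have htail : ks.flatMap (fun k' => L.filter (fun x => keyf x = k'))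
        = ks.flatMap (fun k' => (L.filter (fun x => ¬ keyf x = k)).filter (fun x => keyf x = k')) := by
      apply pv_flatMap_congr
      intro k' hk'
      rw [List.filter_filter]
      apply List.filter_congr
      intro x _
      have hne : ¬ k' = k := fun h => hnd.1 (h ▸ hk')
      by_cases hx : keyf x = k'
      · simp [hx, hne]
      · simp [hx]
    rw [htail]
    have hperm := ih (L.filter (fun x => ¬ keyf x = k)) hnd.2 (by
      intro x hx
      rw [List.mem_filter] at hx
      have := hcov x hx.1
      simp only [List.mem_cons] at this
      rcases this with h | h
      · exact absurd h (by simpa using hx.2)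
      · exact h)
    refine (List.Perm.append_left _ hperm).trans ?_
    have hfe : (fun x => decide (¬ keyf x = k)) = (fun x => !(decide (keyf x = k))) := by
      funext x
      by_cases h : keyf x = k <;> simp [h]
    rw [hfe]
    exact List.filter_append_perm _ L

-- ---------- per-flag equality ----------

-- every member of a bucket for key k has numeric value k.2
theorem pv_bucket_num {T : List ((Int × Int) × String)} (hnum : ∀ t ∈ T, t.1.2 = pvNum t.2)
    (k : Int × Int) {x : String}
    (hx : x ∈ (T.filter (fun t => t.1 == k)).map (·.2)) : pvNum x = k.2 := by
  rw [List.mem_map] at hx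
  obtain ⟨t, ht, rfl⟩ := hx
  rw [List.mem_filter] at ht
  have hk : t.1 = k := by simpa using ht.2
  rw [← hnum t ht.1, hk]

set_option maxHeartbeats 1000000 in
theorem pv_flag_sort (T : List ((Int × Int) × String)) (f : Int) (ks : List (Int × Int))
    (hnum : ∀ t ∈ T, t.1.2 = pvNum t.2)
    (hnd : ks.Nodup) (hkf : ∀ k ∈ ks, k.1 = f)
    (hcov : ∀ t ∈ T, t.1 ∈ ks) :
    (pvIS pvKLt ks).flatMap
        (fun k => PySem.List.sorted ((T.filter (fun t => t.1 == k)).map (·.2)) (fun x => x) false)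
      = pvIS pvSLt (T.map (·.2)) := by
  have hperm_ks := pv_iS_perm pvKLt ks
  have hnd' : (pvIS pvKLt ks).Nodup := (hperm_ks.nodup_iff).mpr hnd
  apply List.Perm.eq_of_pairwise (le := fun a b : String => pvSLt b a = false)
  · intro a b _ _ h h'
    exact pv_sLt_conn a b h' h
  · -- LHS pairwise
    rw [List.pairwise_flatMap]
    constructor
    · intro k hk
      have hnumk : ∀ x ∈ (T.filter (fun t => t.1 == k)).map (·.2), pvNum x = k.2 :=
        fun x hx => pv_bucket_num hnum k hx
      have hp := PySem.List.sorted_pairwise ((T.filter (fun t => t.1 == k)).map (·.2)) (fun x => x)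
      refine hp.imp_of_mem ?_
      intro a b ha hb hab
      rw [PySem.List.mem_sorted] at ha hb
      rw [pv_sLt_false_iff, hnumk a ha, hnumk b hb]
      rintro (h | ⟨_, h2⟩)
      · exact absurd h (lt_irrefl _)
      · exact absurd h2 (not_lt.mpr hab)
    · have hks := pv_iS_pairwise pvKLt pv_kLt_asym pv_kLt_trans ks
      have hcomb := hks.and hnd'
      refine hcomb.imp_of_mem ?_
      intro k k' hk hk' hkk
      have hk0 : k ∈ ks := hperm_ks.mem_iff.mp hk
      have hk0' : k' ∈ ks := hperm_ks.mem_iff.mp hk'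
      have hf1 : k.1 = f := hkf _ hk0
      have hf2 : k'.1 = f := hkf _ hk0'
      have hlt : k.2 < k'.2 := by
        obtain ⟨hle, hne⟩ := hkk
        rw [pv_kLt_false_iff] at hle
        have h2 : k.2 ≠ k'.2 := fun h => hne (Prod.ext (hf1.trans hf2.symm) h)
        omega
      intro x hx y hy
      rw [PySem.List.mem_sorted] at hx hy
      rw [pv_sLt_false_iff, pv_bucket_num hnum k hx, pv_bucket_num hnum k' hy]
      rintro (h | ⟨h1, _⟩)
      · exact absurd hlt (lt_asymm h)
      · exact h1 hlt
  · -- RHS pairwise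
    exact pv_iS_pairwise pvSLt pv_sLt_asym pv_sLt_trans _
  · -- permutation
    refine (pv_flatMap_perm _ _ _ (fun k _ => PySem.List.sorted_perm _ _ _)).trans ?_
    refine List.Perm.trans ?_ ((pv_iS_perm pvSLt _).symm)
    have : (pvIS pvKLt ks).flatMap (fun k => (T.filter (fun t => t.1 == k)).map (·.2))
        = ((pvIS pvKLt ks).flatMap (fun k => T.filter (fun t => t.1 = k))).map (·.2) := by
      rw [List.map_flatMap]
      apply pv_flatMap_congr
      intro k _
      congr 1
      apply List.filter_congr
      intro t _
      by_cases h : t.1 = k <;> simp [h]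
    rw [this]
    apply List.Perm.map
    exact pv_perm_groups (fun t => t.1) (pvIS pvKLt ks) T hnd'
      (fun t ht => hperm_ks.mem_iff.mpr (hcov t ht))

-- ---------- the tag list and A's loop ----------

theorem pv_tag_num (part : String) : (pvTag part).1.2 = pvNum (pvTag part).2 := by
  by_cases h : pvIsNR (PySem.Str.strip part) = true <;> simp [pvTag, h]

theorem pv_tag_flag (part : String) : (pvTag part).1.1 = 0 ∨ (pvTag part).1.1 = 1 := by
  by_cases h : pvIsNR (PySem.Str.strip part) = true <;> simp [pvTag, h]

-- A's accumulator loop = the two filters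
theorem pv_A_fold (parts : List String) :
    ∀ (l n : List String),
      parts.foldl (fun (acc : List String × List String) part =>
          let p := PySem.Str.strip part
          if pvIsNR p then (acc.1, acc.2 ++ [PySem.Str.lower p]) else (acc.1 ++ [p], acc.2)) (l, n)
        = (l ++ ((parts.map PySem.Str.strip).filter (fun p => !pvIsNR p)),
           n ++ (((parts.map PySem.Str.strip).filter pvIsNR).map PySem.Str.lower)) := by
  induction parts with
  | nil => intro l n; simp
  | cons part parts ih =>
    intro l n
    by_cases hc : pvIsNR (PySem.Str.strip part) = true
    · simp [hc, ih]
    · simp only [Bool.not_eq_true] at hc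
      simp [hc, ih]

-- A's two groups are the flag-filters of the tag list
theorem pv_M0 (parts : List String) :
    (parts.map PySem.Str.strip).filter (fun p => !pvIsNR p)
      = ((parts.map pvTag).filter (fun t => t.1.1 == 0)).map (·.2) := by
  induction parts with
  | nil => rfl
  | cons part parts ih =>
    by_cases hc : pvIsNR (PySem.Str.strip part) = true
    · simp [pvTag, hc, ih]
    · simp only [Bool.not_eq_true] at hc
      simp [pvTag, hc, ih]

theorem pv_M1 (parts : List String) :
    ((parts.map PySem.Str.strip).filter pvIsNR).map PySem.Str.lower
      = ((parts.map pvTag).filter (fun t => t.1.1 == 1)).map (·.2) := by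
  induction parts with
  | nil => rfl
  | cons part parts ih =>
    by_cases hc : pvIsNR (PySem.Str.strip part) = true
    · simp [pvTag, hc, ih]
    · simp only [Bool.not_eq_true] at hc
      simp [pvTag, hc, ih]

-- ---------- key-list split ----------

theorem pv_keys_split (K : List (Int × Int))
    (hflag : ∀ k ∈ K, k.1 = 0 ∨ k.1 = 1) :
    pvIS pvKLt K = pvIS pvKLt (K.filter (fun k => k.1 == 0))
      ++ pvIS pvKLt (K.filter (fun k => k.1 == 1)) := by
  apply List.Perm.eq_of_pairwise (le := fun a b : Int × Int => pvKLt b a = false)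
  · intro a b _ _ h h'
    exact pv_kLt_conn a b h' h
  · exact pv_iS_pairwise pvKLt pv_kLt_asym pv_kLt_trans _
  · rw [List.pairwise_append]
    refine ⟨pv_iS_pairwise pvKLt pv_kLt_asym pv_kLt_trans _,
            pv_iS_pairwise pvKLt pv_kLt_asym pv_kLt_trans _, ?_⟩
    intro a ha b hb
    have ha' : a.1 = 0 := by
      have := (pv_iS_perm pvKLt _).mem_iff.mp ha
      rw [List.mem_filter] at this
      simpa using this.2
    have hb' : b.1 = 1 := by
      have := (pv_iS_perm pvKLt _).mem_iff.mp hb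
      rw [List.mem_filter] at this
      simpa using this.2
    rw [pv_kLt_false_iff]
    omega
  · refine (pv_iS_perm pvKLt K).trans ?_
    have h1 : K.filter (fun k => k.1 == 1) = K.filter (fun k => !(k.1 == 0)) := by
      apply List.filter_congr
      intro k hk
      rcases hflag k hk with h | h <;> simp [h]
    rw [h1]
    refine List.Perm.trans (List.filter_append_perm (fun k => k.1 == 0) K).symm ?_
    exact List.Perm.append ((pv_iS_perm pvKLt _).symm) ((pv_iS_perm pvKLt _).symm)

-- ===== VERDICT (by name: the statement is the Claim_ definition above) =====
set_option maxHeartbeats 1000000 in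
theorem normalize_combo_key_py_spec : Claim_equal_normalize_combo_key_py := by
  intro combo_str _
  unfold Spec_normalize_combo_key_py normalize_combo_key_py normalize_combo_key_py_alt
  simp only []
  rw [pv_norm_eq combo_str]
  set s := String.ofList ((PySem.Chars.strip combo_str.toList).flatMap pvNormChar) with hs
  set parts := pvSplitDash s with hparts
  set T := parts.map pvTag with hT
  -- the dict built by B's loop, as a fold over the tag list
  have hfold : parts.foldl
      (fun d part => let t := pvTag part; d.modify t.1 ([] : List String) (· ++ [t.2]))
      (PySem.Dict.empty : PySem.Dict (Int × Int) (List String))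
      = T.foldl (fun d t => d.modify t.1 ([] : List String) (· ++ [t.2])) PySem.Dict.empty := by
    rw [hT, List.foldl_map]
  rw [hfold]
  set D := T.foldl (fun d t => d.modify t.1 ([] : List String) (· ++ [t.2]))
      (PySem.Dict.empty : PySem.Dict (Int × Int) (List String)) with hD
  have hkeys : D.keys = PySem.List.dedup (T.map (·.1)) := by
    rw [hD]
    rw [show (fun (d : PySem.Dict (Int × Int) (List String)) (t : (Int × Int) × String) =>
          d.modify t.1 ([] : List String) (· ++ [t.2]))
        = (fun d t => d.modify ((fun (t : (Int × Int) × String) => t.1) t) ([] : List String)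
            ((fun (_ : PySem.Dict (Int × Int) (List String)) (t : (Int × Int) × String)
              (cur : List String) => cur ++ [t.2]) d t)) from rfl]
    rw [PySem.Dict.keys_foldl_modify_key]
    rw [PySem.List.dedup_eq_ofList]
    simp [PySem.Dict.keys_empty, PySem.Set.update, PySem.Set.ofList, PySem.Set.empty]
  have hgetD : ∀ k, D.getD k [] = (T.filter (fun t => t.1 == k)).map (·.2) := by
    intro k
    rw [hD, PySem.Dict.getD_foldl_modify_append]
    simp
  -- name the tag-list facts
  have hnum : ∀ t ∈ T, t.1.2 = pvNum t.2 := by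
    intro t ht
    rw [hT] at ht
    obtain ⟨part, _, rfl⟩ := List.mem_map.1 ht
    exact pv_tag_num part
  have hflag : ∀ t ∈ T, t.1.1 = 0 ∨ t.1.1 = 1 := by
    intro t ht
    rw [hT] at ht
    obtain ⟨part, _, rfl⟩ := List.mem_map.1 ht
    exact pv_tag_flag part
  set K := PySem.List.dedup (T.map (·.1)) with hK
  have hndK : K.Nodup := PySem.List.nodup_dedup _
  have hKflag : ∀ k ∈ K, k.1 = 0 ∨ k.1 = 1 := by
    intro k hk
    rw [hK, PySem.List.mem_dedup] at hk
    obtain ⟨t, ht, rfl⟩ := List.mem_map.1 hk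
    exact hflag t ht
  -- rewrite B's term
  rw [hkeys, pv_sorted2_K]
  simp only [hgetD]
  -- split the sorted key list by flag and the flatMap over it
  rw [pv_keys_split K hKflag, List.flatMap_append]
  -- A's side
  rw [pv_A_fold parts [] []]
  simp only [List.nil_append, pv_sorted2_A, pv_M0, pv_M1, ← hT]
  -- per-flag: buckets over the full T restrict to the flag filter
  have hbucket : ∀ (f : Int), ∀ k ∈ pvIS pvKLt (K.filter (fun k => k.1 == f)),
      T.filter (fun t => t.1 == k) = (T.filter (fun t => t.1.1 == f)).filter (fun t => t.1 == k) := by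
    intro f k hk
    have hkf : k.1 = f := by
      have := (pv_iS_perm pvKLt _).mem_iff.mp hk
      rw [List.mem_filter] at this
      simpa using this.2
    rw [List.filter_filter]
    apply List.filter_congr
    intro t _
    by_cases h : t.1 = k
    · simp [h, hkf]
    · simp [h]
  have hside : ∀ (f : Int),
      (pvIS pvKLt (K.filter (fun k => k.1 == f))).flatMap
          (fun k => PySem.List.sorted ((T.filter (fun t => t.1 == k)).map (·.2)) (fun x => x) false)
        = pvIS pvSLt ((T.filter (fun t => t.1.1 == f)).map (·.2)) := by
    intro f
    rw [pv_flatMap_congr _ _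
        (fun k => PySem.List.sorted
          (((T.filter (fun t => t.1.1 == f)).filter (fun t => t.1 == k)).map (·.2)) (fun x => x) false)
        (fun k hk => by rw [hbucket f k hk])]
    apply pv_flag_sort (T.filter (fun t => t.1.1 == f)) f (K.filter (fun k => k.1 == f))
    · intro t ht
      exact hnum t (List.mem_filter.1 ht).1
    · exact hndK.filter _
    · intro k hk
      have := (List.mem_filter.1 hk).2
      simpa using this
    · intro t ht
      rw [List.mem_filter] at ht
      rw [List.mem_filter]
      constructor
      · rw [hK, PySem.List.mem_dedup]
        exact List.mem_map.2 ⟨t, ht.1, rfl⟩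
      · have : t.1.1 = f := by simpa using ht.2
        simp [this]
  rw [hside 0, hside 1]
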